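-- pv_equiv track=rewrite | github.com/jackbr4/bookshelf-portal | bookshelf-portal/backend/app/bookshelf_client.py | _parse_author_name
-- ===== SOURCE A (Python) =====
-- def _parse_author_name(author_title: str) -> str:
--     """Extract author name from Bookshelf's 'lastname, firstname booktitle' format."""
--     parts = author_title.split(" ")
--     name_parts = []
--     for part in parts:
--         name_parts.append(part)
--         if len(name_parts) >= 2 and name_parts[0].endswith(","):
--             break
--     if len(name_parts) >= 2:
--         last = name_parts[0].rstrip(",")
--         first = name_parts[1]
--         return f"{first} {last}"
--     return author_title.split(" ")[0]  # fallback
-- ===== SOURCE B (Python) =====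
-- def _parse_author_name(author_title: str) -> str:
--     """Extract author name from Bookshelf's 'lastname, firstname booktitle' format."""
--     last, sep, rest = author_title.partition(" ")
--     if not sep:
--         return author_title
--     first = rest.partition(" ")[0]
--     return f"{first} {last.rstrip(',')}"
-- ===== Notes on version B (the rewrite author's own statement) =====
-- stated objective: simpler
-- what changed: B never builds the token list: instead of split-into-all-tokens plus an accumulator loop with a break, it uses str.partition twice to peel off just the first two space-delimited fields directly from the string.
import Mathlib
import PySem

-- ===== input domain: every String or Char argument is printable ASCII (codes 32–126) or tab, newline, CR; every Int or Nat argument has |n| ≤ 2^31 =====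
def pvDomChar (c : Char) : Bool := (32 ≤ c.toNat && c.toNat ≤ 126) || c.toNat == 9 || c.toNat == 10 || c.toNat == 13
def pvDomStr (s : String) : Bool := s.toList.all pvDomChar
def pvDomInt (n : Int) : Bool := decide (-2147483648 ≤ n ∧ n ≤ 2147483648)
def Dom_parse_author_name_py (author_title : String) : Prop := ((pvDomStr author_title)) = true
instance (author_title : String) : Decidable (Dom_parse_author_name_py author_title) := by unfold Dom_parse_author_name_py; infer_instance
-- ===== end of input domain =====

-- B replaces A's split-into-all-tokens + accumulator loop by two str.partition calls that
-- peel off only the first two space-delimited fields (simpler).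

-- rstrip(","): drops trailing ',' characters only — exact for this fixed chars argument.
def pvRstripComma (s : String) : String :=
  String.ofList ((s.toList.reverse.dropWhile (· == ',')).reverse)

-- ===== PORT A =====
-- split? " " is some for the non-empty literal separator, so .getD [] below is exact.
-- The for-loop with break, as structural recursion over the remaining parts with accumulator name_parts.
def pvLoopA : List String → List String → List String
  | [], acc => acc
  | p :: rest, acc =>
    let acc' := acc ++ [p]
    if 2 ≤ acc'.length ∧ PySem.Str.endswith (acc'.getD 0 "") "," = true then acc'
    else pvLoopA rest acc'

def parse_author_name_py (author_title : String) : String :=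
  let parts := (PySem.Str.split? author_title " ").getD []
  let name_parts := pvLoopA parts []
  if 2 ≤ name_parts.length then
    let last := pvRstripComma (name_parts.getD 0 "")
    let first := name_parts.getD 1 ""
    first ++ " " ++ last
  else ((PySem.Str.split? author_title " ").getD []).getD 0 ""

-- ===== PORT B =====
-- Hand port of Python str.partition(" ") (PySem has no partition): exact — splits at the FIRST
-- space; second component none means the separator was not found (Python's sep == "").
def pvPartitionSpace : List Char → List Char × Option (List Char)
  | [] => ([], none)
  | c :: rest =>
    if c = ' ' then ([], some rest)
    else
      let (pre, r) := pvPartitionSpace rest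
      (c :: pre, r)

def parse_author_name_py_alt (author_title : String) : String :=
  match pvPartitionSpace author_title.toList with
  | (_, none) => author_title
  | (last, some rest) =>
    let first := (pvPartitionSpace rest).1
    String.ofList first ++ " " ++ pvRstripComma (String.ofList last)

-- ===== PRECONDITION & SPEC =====
def Spec_parse_author_name_py (author_title : String) (out : String) : Prop := out = parse_author_name_py_alt author_title
instance (author_title : String) (out : String) : Decidable (Spec_parse_author_name_py author_title out) := by unfold Spec_parse_author_name_py; infer_instance

-- ===== CLAIM =====
def Claim_equal_parse_author_name_py : Prop := ∀ (author_title : String), Dom_parse_author_name_py author_title → Spec_parse_author_name_py author_title (parse_author_name_py author_title)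

-- ===== LEMMAS AND PROOFS =====

-- pure recursive reading of splitOn on the single-char separator ' '
def pvSplitSp (pre : List Char) : List Char → List (List Char)
  | [] => [pre]
  | c :: rest => if c = ' ' then pre :: pvSplitSp [] rest else pvSplitSp (pre ++ [c]) rest

lemma pvSplitOn_go_eq (fuel : Nat) : ∀ (l cur : List Char) (acc : List (List Char)),
    l.length ≤ fuel →
    PySem.Chars.splitOn.go [' '] fuel l cur acc = acc.reverse ++ pvSplitSp cur.reverse l := by
  induction fuel with
  | zero =>
    intro l cur acc h
    have : l = [] := List.length_eq_zero_iff.mp (Nat.le_zero.mp h)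
    subst this
    simp [PySem.Chars.splitOn.go, pvSplitSp]
  | succ n ih =>
    intro l cur acc h
    cases l with
    | nil => simp [PySem.Chars.splitOn.go, pvSplitSp]
    | cons c rest =>
      have hgo : PySem.Chars.splitOn.go [' '] (n+1) (c :: rest) cur acc =
          if List.isPrefixOf [' '] (c :: rest) then
            PySem.Chars.splitOn.go [' '] n (List.drop 1 (c :: rest)) [] (cur.reverse :: acc)
          else PySem.Chars.splitOn.go [' '] n rest (c :: cur) acc := rfl
      have hlen : rest.length ≤ n := by simpa using Nat.le_of_succ_le_succ h
      by_cases hc : c = ' '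
      · subst hc
        rw [hgo, if_pos (by simp [List.isPrefixOf])]
        rw [List.drop_one, List.tail_cons, ih rest [] (cur.reverse :: acc) hlen]
        simp [pvSplitSp]
      · rw [hgo, if_neg (by simp [List.isPrefixOf, Ne.symm hc])]
        rw [ih rest (c :: cur) acc hlen]
        simp [pvSplitSp, hc]

lemma pvSplitOn_eq (cs : List Char) : PySem.Chars.splitOn cs [' '] = pvSplitSp [] cs := by
  unfold PySem.Chars.splitOn
  rw [pvSplitOn_go_eq (cs.length + 1) cs [] [] (Nat.le_succ _)]
  simp

-- pvSplitSp expressed through partition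
lemma pvSplitSp_partition (cs : List Char) : ∀ pre : List Char,
    pvSplitSp pre cs =
      match pvPartitionSpace cs with
      | (p, none) => [pre ++ p]
      | (p, some rest) => (pre ++ p) :: pvSplitSp [] rest := by
  induction cs with
  | nil => intro pre; simp [pvSplitSp, pvPartitionSpace]
  | cons c rest ih =>
    intro pre
    by_cases hc : c = ' '
    · subst hc; simp [pvSplitSp, pvPartitionSpace]
    · simp only [pvSplitSp, pvPartitionSpace, if_neg hc]
      rw [ih (pre ++ [c])]
      cases hpp : pvPartitionSpace rest with
      | mk p r => cases r <;> simp

-- once the accumulator holds at least two elements, the loop keeps its first two elements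
lemma pvLoopA_keeps (rem : List String) : ∀ acc : List String, 2 ≤ acc.length →
    (pvLoopA rem acc).getD 0 "" = acc.getD 0 "" ∧
    (pvLoopA rem acc).getD 1 "" = acc.getD 1 "" ∧
    2 ≤ (pvLoopA rem acc).length := by
  induction rem with
  | nil => intro acc h; simpa [pvLoopA] using h
  | cons p rest ih =>
    intro acc h
    simp only [pvLoopA]
    split
    · refine ⟨?_, ?_, by simp; omega⟩ <;>
        rw [List.getD_append _ _ _ _ (by omega)]
    · have := ih (acc ++ [p]) (by simp; omega)
      refine ⟨?_, ?_, this.2.2⟩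
      · rw [this.1, List.getD_append _ _ _ _ (by omega)]
      · rw [this.2.1, List.getD_append _ _ _ _ (by omega)]

lemma pv_parts (author_title : String) :
    (PySem.Str.split? author_title " ").getD []
      = (PySem.Chars.splitOn author_title.toList [' ']).map String.ofList := by
  simp [PySem.Str.split?, PySem.Chars.split?]

-- A's value depends only on the first two tokens of the split (or the lone token)
lemma pvA_eq (author_title : String) :
    parse_author_name_py author_title =
      match (PySem.Str.split? author_title " ").getD [] with
      | [] => ""
      | [a] => a
      | a :: b :: _ => b ++ " " ++ pvRstripComma a := by
  unfold parse_author_name_py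
  cases hp : (PySem.Str.split? author_title " ").getD [] with
  | nil => simp [pvLoopA]
  | cons a t =>
    cases t with
    | nil => simp [pvLoopA]
    | cons b rest =>
      simp only [pvLoopA, List.nil_append, List.length_cons, List.length_nil]
      norm_num
      split
      · simp
      · have := pvLoopA_keeps rest [a, b] (by simp)
        simp only [List.getD] at this
        rw [if_pos this.2.2]
        simp [this.1, this.2.1]

lemma pvSplitSp_head (rest : List Char) : ∃ t, pvSplitSp [] rest = (pvPartitionSpace rest).1 :: t := by
  cases h2 : pvPartitionSpace rest with
  | mk q r2 =>
    rw [pvSplitSp_partition rest [], h2]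
    cases r2 with
    | none => exact ⟨[], by simp⟩
    | some rest2 => exact ⟨pvSplitSp [] rest2, by simp⟩

lemma pvPartition_none_eq : ∀ (cs p : List Char), pvPartitionSpace cs = (p, none) → p = cs := by
  intro cs
  induction cs with
  | nil =>
    intro p h
    injection h with h1 _
    exact h1.symm
  | cons c rest ih =>
    intro p h
    by_cases hc : c = ' '
    · subst hc; simp [pvPartitionSpace] at h
    · simp only [pvPartitionSpace, if_neg hc] at h
      cases h2 : pvPartitionSpace rest with
      | mk p2 r2 =>
        rw [h2] at h
        cases r2 with
        | none =>
          have h1 : c :: p2 = p := congrArg Prod.fst h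
          rw [← h1, ih p2 h2]
        | some _ => exact absurd (congrArg Prod.snd h) (by simp)

lemma pv_main (author_title : String) :
    parse_author_name_py author_title = parse_author_name_py_alt author_title := by
  rw [pvA_eq, pv_parts, pvSplitOn_eq, pvSplitSp_partition]
  unfold parse_author_name_py_alt
  cases hpp : pvPartitionSpace author_title.toList with
  | mk p r =>
    cases r with
    | none =>
      have hp := pvPartition_none_eq _ _ hpp
      subst hp
      simp
    | some rest =>
      obtain ⟨t, ht⟩ := pvSplitSp_head rest
      simp [ht]

-- ===== VERDICT =====
theorem parse_author_name_py_spec : Claim_equal_parse_author_name_py := by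
  intro s _
  unfold Spec_parse_author_name_py
  exact pv_main s
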